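-- pv_equiv track=rewrite | github.com/rodgzilla/project-euler | problem_075/problem.py | generate_multiple
-- ===== SOURCE A (Python) =====
-- def generate_multiple(a, b, c, max_value):
--     res = []
--     current_a = a
--     current_b = b
--     current_c = c
--     while current_a + current_b + current_c <= max_value:
--         yield (current_a, current_b, current_c)
--         current_a += a
--         current_b += b
--         current_c += c
-- ===== SOURCE B (Python) =====
-- def generate_multiple(a, b, c, max_value):
--     s = a + b + c
--     if s <= 0:
--         return
--     for k in range(1, max_value // s + 1):
--         yield (a * k, b * k, c * k)
-- ===== Notes on version B (the rewrite author's own statement) =====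
-- stated objective: alternative
-- what changed: Replaces the while loop with three running accumulators by a closed-form bound k_max = max_value // (a+b+c) and a single multiplicative index loop yielding (a*k, b*k, c*k).
import Mathlib
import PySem

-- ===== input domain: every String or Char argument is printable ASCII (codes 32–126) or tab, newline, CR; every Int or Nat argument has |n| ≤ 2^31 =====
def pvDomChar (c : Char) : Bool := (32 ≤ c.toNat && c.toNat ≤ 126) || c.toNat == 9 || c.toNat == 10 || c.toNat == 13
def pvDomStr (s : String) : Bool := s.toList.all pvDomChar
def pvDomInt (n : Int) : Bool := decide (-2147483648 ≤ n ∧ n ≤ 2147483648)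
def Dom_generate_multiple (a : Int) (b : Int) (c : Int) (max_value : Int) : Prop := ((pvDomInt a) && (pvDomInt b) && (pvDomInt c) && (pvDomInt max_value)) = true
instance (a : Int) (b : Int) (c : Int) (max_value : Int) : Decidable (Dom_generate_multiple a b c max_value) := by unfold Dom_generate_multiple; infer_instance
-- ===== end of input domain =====

-- B replaces A's while loop with three accumulators by a closed-form bound max_value // (a+b+c)
-- and a single multiplicative index loop (alternative decomposition, same cost).
-- Pre_ excludes inputs where A's while condition never fails (a+b+c ≤ 0 and a+b+c ≤ max_value):
-- there A (a generator) yields forever / its list() diverges; B naturally yields nothing.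


-- ===== PORT A =====
-- A's while loop; fuel only makes the recursion total (on Pre_ it never runs out:
-- with s = a+b+c ≥ 1 the loop runs at most max_value times).
def generate_multiple_loop (a b c max_value ca cb cc : Int) : Nat → List (Int × Int × Int)
  | 0 => []
  | fuel + 1 =>
    if ca + cb + cc ≤ max_value then
      (ca, cb, cc) :: generate_multiple_loop a b c max_value (ca + a) (cb + b) (cc + c) fuel
    else []

def generate_multiple (a : Int) (b : Int) (c : Int) (max_value : Int) : List (Int × Int × Int) :=
  generate_multiple_loop a b c max_value a b c (max_value.toNat + 1)

-- ===== PORT B =====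
def generate_multiple_alt (a : Int) (b : Int) (c : Int) (max_value : Int) : List (Int × Int × Int) :=
  let s := a + b + c
  if s ≤ 0 then []
  else (PySem.List.pyRange 1 (PySem.Int.floordiv max_value s + 1) 1).map
         (fun k => (a * k, b * k, c * k))

-- ===== PRECONDITION & SPEC =====
-- Excludes exactly the inputs where a+b+c ≤ 0 and a+b+c ≤ max_value: there A's while
-- condition holds forever and list(A(...)) diverges (A never returns).
def Pre_generate_multiple (a : Int) (b : Int) (c : Int) (max_value : Int) : Prop :=
  0 < a + b + c ∨ max_value < a + b + c
instance (a : Int) (b : Int) (c : Int) (max_value : Int) : Decidable (Pre_generate_multiple a b c max_value) := by unfold Pre_generate_multiple; infer_instance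
def pvWitness_generate_multiple : Int × Int × Int × Int := (3, 4, 5, 100)

def Spec_generate_multiple (a : Int) (b : Int) (c : Int) (max_value : Int) (out : List (Int × Int × Int)) : Prop := out = generate_multiple_alt a b c max_value
instance (a : Int) (b : Int) (c : Int) (max_value : Int) (out : List (Int × Int × Int)) : Decidable (Spec_generate_multiple a b c max_value out) := by unfold Spec_generate_multiple; infer_instance

-- ===== CLAIM (what is proved, stated in full; the proofs are below) =====
def Claim_equal_generate_multiple : Prop := ∀ (a : Int) (b : Int) (c : Int) (max_value : Int), Dom_generate_multiple a b c max_value → Pre_generate_multiple a b c max_value → Spec_generate_multiple a b c max_value (generate_multiple a b c max_value)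

-- ===== LEMMAS AND PROOFS =====

-- Loop invariant: at step k (k ≥ 1) the accumulators are (k*a, k*b, k*c), and with
-- enough fuel the remaining loop emits exactly the range [k, max_value//s].
theorem generate_multiple_loop_eq (a b c max_value : Int) (hs : 0 < a + b + c) :
    ∀ (fuel : Nat) (k : Int), 1 ≤ k →
      (PySem.Int.floordiv max_value (a + b + c) + 1 - k).toNat ≤ fuel →
      generate_multiple_loop a b c max_value (k * a) (k * b) (k * c) fuel =
        (PySem.List.pyRange k (PySem.Int.floordiv max_value (a + b + c) + 1) 1).map
          (fun j => (a * j, b * j, c * j)) := by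
  intro fuel
  induction fuel with
  | zero =>
    intro k hk hfuel
    have h1 : PySem.Int.floordiv max_value (a + b + c) + 1 ≤ k := by omega
    rw [PySem.List.pyRange_one_eq_nil h1]
    rfl
  | succ fuel ih =>
    intro k hk hfuel
    by_cases h : k * a + k * b + k * c ≤ max_value
    · have hle : k ≤ PySem.Int.floordiv max_value (a + b + c) := by
        rw [PySem.Int.le_floordiv_iff_mul_le hs]
        nlinarith
      have hlt : k < PySem.Int.floordiv max_value (a + b + c) + 1 := by omega
      rw [generate_multiple_loop, if_pos h, PySem.List.pyRange_one_cons hlt, List.map_cons]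
      have hstep : ∀ x : Int, k * x + x = (k + 1) * x := by intro x; ring
      rw [hstep a, hstep b, hstep c, ih (k + 1) (by omega) (by omega)]
      simp [mul_comm]
    · have hgt : PySem.Int.floordiv max_value (a + b + c) < k := by
        rw [PySem.Int.floordiv_lt_iff_lt_mul hs]
        nlinarith
      rw [generate_multiple_loop, if_neg h, PySem.List.pyRange_one_eq_nil (by omega)]
      rfl

-- For 0 < s, max_value // s is at most max_value.toNat (so the fuel suffices).
theorem floordiv_le_toNat (max_value s : Int) (hs : 0 < s) :
    (PySem.Int.floordiv max_value s).toNat ≤ max_value.toNat := by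
  by_cases hmv : 0 ≤ max_value
  · have : PySem.Int.floordiv max_value s < max_value + 1 := by
      rw [PySem.Int.floordiv_lt_iff_lt_mul hs]
      nlinarith
    omega
  · have : PySem.Int.floordiv max_value s < 1 := by
      rw [PySem.Int.floordiv_lt_iff_lt_mul hs]
      omega
    omega

-- ===== VERDICT (by name: the statement is the Claim_ definition above) =====
theorem generate_multiple_spec : Claim_equal_generate_multiple := by
  intro a b c max_value _hdom hpre
  unfold Spec_generate_multiple generate_multiple generate_multiple_alt
  by_cases hs : a + b + c ≤ 0
  · -- Pre_ forces max_value < a+b+c: the loop's first test fails, B yields nothing.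
    have hmv : max_value < a + b + c := by
      rcases hpre with h | h
      · omega
      · exact h
    rw [generate_multiple_loop, if_neg (by omega)]
    simp [hs]
  · push_neg at hs
    have h1 := floordiv_le_toNat max_value (a + b + c) hs
    have := generate_multiple_loop_eq a b c max_value hs (max_value.toNat + 1) 1
      (le_refl 1) (by omega)
    simp only [one_mul] at this
    rw [this]
    simp [not_le.mpr hs]
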